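-- pv_equiv track=rewrite | github.com/Jadessswq/MainCheck | Сервер/local/main.py | _expand_word_context
-- ===== SOURCE A (Python) =====
-- def _expand_word_context(s: str, lo: int, hi: int) -> tuple[int, int]:
--     """Расширяет [lo, hi) до границ слов с прихватом одного соседнего слова
--     с каждой стороны. Используется для генерации читаемых «было»/«стало»
--     в `_rebuild_changes_from_diff` — голый character-level diff даёт обрывки
--     типа «,» вместо «задач, по», что бесполезно пользователю и неуникально
--     для клиентского InStr."""
--     # Сворачиваем влево до начала текущего слова
--     while lo > 0 and not s[lo - 1].isspace():
--         lo -= 1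
--     # Прихватываем одно предыдущее слово (через пробел)
--     if lo > 0:
--         while lo > 0 and s[lo - 1].isspace():
--             lo -= 1
--         while lo > 0 and not s[lo - 1].isspace():
--             lo -= 1
--     # Сворачиваем вправо до конца текущего слова
--     while hi < len(s) and not s[hi].isspace():
--         hi += 1
--     # Прихватываем одно следующее слово
--     if hi < len(s):
--         while hi < len(s) and s[hi].isspace():
--             hi += 1
--         while hi < len(s) and not s[hi].isspace():
--             hi += 1
--     return lo, hi
-- ===== SOURCE B (Python) =====
-- def _expand_word_context(s: str, lo: int, hi: int) -> tuple[int, int]: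
--     """Span-table re-implementation: one pass builds the (start, end) spans of
--     all maximal non-space runs, then the four boundary moves become lookups."""
--     n = len(s)
--     spans = []
--     start = None
--     for i, c in enumerate(s):
--         if c.isspace():
--             if start is not None:
--                 spans.append((start, i))
--                 start = None
--         elif start is None:
--             start = i
--     if start is not None:
--         spans.append((start, n))
--     # collapse lo to the start of the word containing position lo-1, if any
--     for st, en in spans:
--         if st <= lo - 1 < en:
--             lo = st
--             break
--     # grab one previous word: start of the last span ending at or before lo
--     if lo > 0:
--         p = 0
--         for st, en in spans:
--             if en <= lo:
--                 p = st
--         lo = p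
--     # collapse hi to the end of the word containing position hi, if any
--     for st, en in spans:
--         if st <= hi < en:
--             hi = en
--             break
--     # grab one following word: end of the first span starting at or after hi
--     if hi < n:
--         q = n
--         for st, en in reversed(spans):
--             if st >= hi:
--                 q = en
--         hi = q
--     return lo, hi
-- ===== Notes on version B (the rewrite author's own statement) =====
-- stated objective: alternative
-- what changed: Replaces A's four boundary-walking while loops by a single left-to-right pass that builds the table of word spans (start, end of every maximal non-space run) and then computes all four boundary moves as lookups in that table (first span containing the boundary, last span ending before it, first span starting after it).
-- outside the precondition, e.g. on _expand_word_context('a b', 0, -1): A returns (0, 3), B returns (0, 1)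
import Mathlib
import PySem

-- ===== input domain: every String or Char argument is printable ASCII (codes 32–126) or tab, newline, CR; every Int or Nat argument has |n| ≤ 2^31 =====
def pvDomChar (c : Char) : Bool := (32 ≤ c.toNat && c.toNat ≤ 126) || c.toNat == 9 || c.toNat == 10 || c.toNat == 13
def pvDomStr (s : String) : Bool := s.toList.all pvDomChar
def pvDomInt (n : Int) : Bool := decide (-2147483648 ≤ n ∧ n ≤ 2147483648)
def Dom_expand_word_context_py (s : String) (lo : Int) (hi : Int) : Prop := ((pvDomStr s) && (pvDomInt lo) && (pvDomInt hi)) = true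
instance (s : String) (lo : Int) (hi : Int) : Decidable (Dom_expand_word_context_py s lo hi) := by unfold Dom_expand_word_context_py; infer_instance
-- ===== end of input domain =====

-- B replaces A's four boundary-walking while loops by one pass that tabulates the word spans and then looks the new
-- boundaries up in that table (alternative decomposition, same exact return value on Pre_).

-- ===== PORT A =====
-- while lo > 0 and not s[lo-1].isspace(): lo -= 1   (used twice in A: collapse-left and grab-previous-word)
def pvAWordL (cs : List Char) (lo : Int) : Int :=
  if h : 0 < lo ∧ ((PySem.List.pyGet? cs (lo - 1)).any fun c => !PySem.Chars.isspace c) = true then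
    pvAWordL cs (lo - 1)
  else lo
termination_by lo.toNat
decreasing_by obtain ⟨h1, -⟩ := h; omega

-- while lo > 0 and s[lo-1].isspace(): lo -= 1
def pvASkipL (cs : List Char) (lo : Int) : Int :=
  if h : 0 < lo ∧ ((PySem.List.pyGet? cs (lo - 1)).any fun c => PySem.Chars.isspace c) = true then
    pvASkipL cs (lo - 1)
  else lo
termination_by lo.toNat
decreasing_by obtain ⟨h1, -⟩ := h; omega

-- while hi < len(s) and not s[hi].isspace(): hi += 1   (used twice: collapse-right and grab-next-word)
def pvAWordR (cs : List Char) (hi : Int) : Int :=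
  if h : hi < (cs.length : Int) ∧ ((PySem.List.pyGet? cs hi).any fun c => !PySem.Chars.isspace c) = true then
    pvAWordR cs (hi + 1)
  else hi
termination_by ((cs.length : Int) - hi).toNat
decreasing_by obtain ⟨h1, -⟩ := h; omega

-- while hi < len(s) and s[hi].isspace(): hi += 1
def pvASkipR (cs : List Char) (hi : Int) : Int :=
  if h : hi < (cs.length : Int) ∧ ((PySem.List.pyGet? cs hi).any fun c => PySem.Chars.isspace c) = true then
    pvASkipR cs (hi + 1)
  else hi
termination_by ((cs.length : Int) - hi).toNat
decreasing_by obtain ⟨h1, -⟩ := h; omega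

def expand_word_context_py (s : String) (lo : Int) (hi : Int) : Int × Int :=
  let cs := s.toList
  let lo1 := pvAWordL cs lo
  let lo2 := if 0 < lo1 then pvAWordL cs (pvASkipL cs lo1) else lo1
  let hi1 := pvAWordR cs hi
  let hi2 := if hi1 < (cs.length : Int) then pvAWordR cs (pvASkipR cs hi1) else hi1
  (lo2, hi2)

-- ===== PORT B =====
-- one enumerate-fold that builds the (start, end) spans of all maximal non-space runs
def pvBStep (st : List (Int × Int) × Option Int) (ic : Int × Char) : List (Int × Int) × Option Int :=
  if PySem.Chars.isspace ic.2 then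
    match st.2 with
    | some a => (st.1 ++ [(a, ic.1)], none)
    | none => st
  else
    match st.2 with
    | none => (st.1, some ic.1)
    | some _ => st

def pvBSpans (cs : List Char) : List (Int × Int) :=
  let r := (PySem.List.enumerate cs).foldl pvBStep ([], none)
  match r.2 with
  | some a => r.1 ++ [(a, (cs.length : Int))]
  | none => r.1

def expand_word_context_py_alt (s : String) (lo : Int) (hi : Int) : Int × Int :=
  let cs := s.toList
  let n : Int := cs.length
  let spans := pvBSpans cs
  let lo1 := match spans.find? (fun p => decide (p.1 ≤ lo - 1 ∧ lo - 1 < p.2)) with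
             | some p => p.1
             | none => lo
  let lo2 := if 0 < lo1 then spans.foldl (fun p q => if q.2 ≤ lo1 then q.1 else p) 0 else lo1
  let hi1 := match spans.find? (fun p => decide (p.1 ≤ hi ∧ hi < p.2)) with
             | some p => p.2
             | none => hi
  let hi2 := if hi1 < n then spans.reverse.foldl (fun q p => if hi1 ≤ p.1 then p.2 else q) n else hi1
  (lo2, hi2)

-- ===== PRECONDITION & SPEC =====
-- Pre_ keeps the natural domain of a character range [lo, hi) of s: 0 ≤ hi and lo ≤ len(s).  It excludes lo > len(s)
-- and hi < -len(s), where A raises IndexError, and -len(s) ≤ hi ≤ -1, which is outside the natural domain and where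
-- A's returned value comes from Python's negative-index wraparound (s[hi] counted from the end of the string).
def Pre_expand_word_context_py (s : String) (lo : Int) (hi : Int) : Prop :=
  lo ≤ (s.toList.length : Int) ∧ 0 ≤ hi
instance (s : String) (lo : Int) (hi : Int) : Decidable (Pre_expand_word_context_py s lo hi) := by
  unfold Pre_expand_word_context_py; infer_instance

def pvWitness_expand_word_context_py : String × Int × Int := ("a b", 1, 1)

def Spec_expand_word_context_py (s : String) (lo : Int) (hi : Int) (out : Int × Int) : Prop := out = expand_word_context_py_alt s lo hi
instance (s : String) (lo : Int) (hi : Int) (out : Int × Int) : Decidable (Spec_expand_word_context_py s lo hi out) := by unfold Spec_expand_word_context_py; infer_instance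

-- ===== CLAIM (what is proved, stated in full; the proofs are below) =====
def Claim_equal_expand_word_context_py : Prop := ∀ (s : String) (lo : Int) (hi : Int), Dom_expand_word_context_py s lo hi → Pre_expand_word_context_py s lo hi → Spec_expand_word_context_py s lo hi (expand_word_context_py s lo hi)

-- ===== LEMMAS AND PROOFS =====

-- "position i of cs is a valid index holding a non-space character"
def pvNS (cs : List Char) (i : Int) : Prop :=
  0 ≤ i ∧ ((PySem.List.pyGet? cs i).any fun c => !PySem.Chars.isspace c) = true

lemma pvNS_lt {cs : List Char} {i : Int} (h : pvNS cs i) : i < (cs.length : Int) := by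
  obtain ⟨h0, hg⟩ := h
  by_contra hlt
  rw [PySem.List.pyGet?_of_nonneg _ h0, List.getElem?_eq_none (by omega)] at hg
  simp at hg

lemma pvNS_valid_iff {cs : List Char} {i : Int} (h0 : 0 ≤ i) (h1 : i < (cs.length : Int)) :
    (((PySem.List.pyGet? cs i).any fun c => PySem.Chars.isspace c) = true ↔ ¬ pvNS cs i) := by
  rw [PySem.List.pyGet?_eq_some_getElem _ h0 h1]
  unfold pvNS
  rw [PySem.List.pyGet?_eq_some_getElem _ h0 h1]
  simp [h0]

-- fold invariant: after processing the first k characters, acc holds the closed maximal runs and o the open one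
def pvInv (cs : List Char) (k : Int) (acc : List (Int × Int)) (o : Option Int) : Prop :=
  (∀ p ∈ acc, 0 ≤ p.1 ∧ p.1 < p.2 ∧ p.2 ≤ k ∧ (∀ i, p.1 ≤ i → i < p.2 → pvNS cs i) ∧ ¬ pvNS cs (p.1 - 1) ∧ ¬ pvNS cs p.2) ∧
  (∀ a, o = some a → 0 ≤ a ∧ a < k ∧ (∀ i, a ≤ i → i < k → pvNS cs i) ∧ ¬ pvNS cs (a - 1)) ∧
  (∀ i, 0 ≤ i → i < k → pvNS cs i → (∃ p ∈ acc, p.1 ≤ i ∧ i < p.2) ∨ (∃ a, o = some a ∧ a ≤ i)) ∧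
  acc.Pairwise (fun p q => p.2 ≤ q.1) ∧
  (∀ p ∈ acc, ∀ a, o = some a → p.2 ≤ a)

lemma pvInv_step (cs : List Char) (k : Int) (acc : List (Int × Int)) (o : Option Int) (c : Char)
    (hc : PySem.List.pyGet? cs k = some c) (h0 : 0 ≤ k) (h : pvInv cs k acc o) :
    pvInv cs (k + 1) (pvBStep (acc, o) (k, c)).1 (pvBStep (acc, o) (k, c)).2 := by
  obtain ⟨hacc, ho, hcov, hpw, hsep⟩ := h
  have hNSk : pvNS cs k ↔ PySem.Chars.isspace c = false := by
    unfold pvNS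
    rw [hc]
    cases hcs : PySem.Chars.isspace c <;> simp [h0, hcs]
  by_cases hsp : PySem.Chars.isspace c = true
  · cases o with
    | none =>
        have hstep : pvBStep (acc, none) (k, c) = (acc, none) := by simp [pvBStep, hsp]
        rw [hstep]
        refine ⟨?_, by simp, ?_, hpw, by simp⟩
        · intro p hp
          obtain ⟨a1, a2, a3, a4, a5, a6⟩ := hacc p hp
          exact ⟨a1, a2, by omega, a4, a5, a6⟩
        · intro i hi0 hi1 hNS
          by_cases hik : i = k
          · rw [hik, hNSk] at hNS
            simp [hNS] at hsp
          · rcases hcov i hi0 (by omega) hNS with h'' | ⟨a0, ha0, _⟩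
            · exact Or.inl h''
            · cases ha0
    | some a0 =>
        have hstep : pvBStep (acc, some a0) (k, c) = (acc ++ [(a0, k)], none) := by
          simp [pvBStep, hsp]
        rw [hstep]
        obtain ⟨b0, b1, b2, b3⟩ := ho a0 rfl
        refine ⟨?_, by simp, ?_, ?_, by simp⟩
        · intro p hp
          rcases List.mem_append.mp hp with hp' | hp'
          · obtain ⟨a1, a2, a3, a4, a5, a6⟩ := hacc p hp'
            exact ⟨a1, a2, by omega, a4, a5, a6⟩
          · have hpk : p = (a0, k) := by simpa using hp'
            subst hpk
            refine ⟨b0, b1, by omega, b2, b3, ?_⟩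
            intro hNS
            rw [hNSk] at hNS
            simp [hNS] at hsp
        · intro i hi0 hi1 hNS
          by_cases hik : i = k
          · rw [hik, hNSk] at hNS
            simp [hNS] at hsp
          · rcases hcov i hi0 (by omega) hNS with ⟨p, hp, hpi⟩ | ⟨a1, ha1, hai⟩
            · exact Or.inl ⟨p, List.mem_append_left _ hp, hpi⟩
            · have haa : a1 = a0 := by injection ha1 with h'; omega
              refine Or.inl ⟨(a0, k), List.mem_append_right _ (by simp), by simp; omega⟩
        · rw [List.pairwise_append]
          refine ⟨hpw, by simp, ?_⟩
          intro p hp q hq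
          have hq' : q = (a0, k) := by simpa using hq
          subst hq'
          exact hsep p hp a0 rfl
  · rw [Bool.not_eq_true] at hsp
    have hNSkT : pvNS cs k := hNSk.mpr hsp
    cases o with
    | none =>
        have hstep : pvBStep (acc, none) (k, c) = (acc, some k) := by simp [pvBStep, hsp]
        rw [hstep]
        refine ⟨?_, ?_, ?_, hpw, ?_⟩
        · intro p hp
          obtain ⟨a1, a2, a3, a4, a5, a6⟩ := hacc p hp
          exact ⟨a1, a2, by omega, a4, a5, a6⟩
        · intro a0 ha0
          have hak : a0 = k := by injection ha0 with h'; omega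
          refine ⟨by omega, by omega, ?_, ?_⟩
          · intro i h1 h2
            have hik : i = k := by omega
            rw [hik]
            exact hNSkT
          · intro hNS
            rw [hak] at hNS
            rcases hcov (k - 1) hNS.1 (by omega) hNS with ⟨p, hp, hpi⟩ | ⟨a1, ha1, _⟩
            · obtain ⟨a1, a2, a3, a4, a5, a6⟩ := hacc p hp
              have hp2 : p.2 = k := by omega
              rw [hp2] at a6
              exact a6 hNSkT
            · cases ha1
        · intro i hi0 hi1 hNS
          by_cases hik : i = k
          · exact Or.inr ⟨k, rfl, by omega⟩
          · rcases hcov i hi0 (by omega) hNS with h'' | ⟨a0, ha0, _⟩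
            · exact Or.inl h''
            · cases ha0
        · intro p hp a0 ha0
          have hak : a0 = k := by injection ha0 with h'; omega
          rw [hak]
          exact (hacc p hp).2.2.1
    | some a0 =>
        have hstep : pvBStep (acc, some a0) (k, c) = (acc, some a0) := by simp [pvBStep, hsp]
        rw [hstep]
        obtain ⟨b0, b1, b2, b3⟩ := ho a0 rfl
        refine ⟨?_, ?_, ?_, hpw, ?_⟩
        · intro p hp
          obtain ⟨a1, a2, a3, a4, a5, a6⟩ := hacc p hp
          exact ⟨a1, a2, by omega, a4, a5, a6⟩
        · intro a1 ha1
          have haa : a1 = a0 := by injection ha1 with h'; omega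
          rw [haa]
          refine ⟨b0, by omega, ?_, b3⟩
          intro i h1 h2
          by_cases hik : i = k
          · rw [hik]; exact hNSkT
          · exact b2 i h1 (by omega)
        · intro i hi0 hi1 hNS
          by_cases hik : i = k
          · exact Or.inr ⟨a0, rfl, by omega⟩
          · rcases hcov i hi0 (by omega) hNS with h'' | ⟨a1, ha1, hai⟩
            · exact Or.inl h''
            · have haa : a1 = a0 := by injection ha1 with h'; omega
              exact Or.inr ⟨a0, rfl, by omega⟩
        · intro p hp a1 ha1
          have haa : a1 = a0 := by injection ha1 with h'; omega
          rw [haa]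
          exact hsep p hp a0 rfl

-- the spans table is correct
def pvSpansOK (cs : List Char) (L : List (Int × Int)) : Prop :=
  (∀ p ∈ L, 0 ≤ p.1 ∧ p.1 < p.2 ∧ p.2 ≤ (cs.length : Int) ∧ (∀ i, p.1 ≤ i → i < p.2 → pvNS cs i) ∧ ¬ pvNS cs (p.1 - 1) ∧ ¬ pvNS cs p.2) ∧
  (∀ i, pvNS cs i → ∃ p ∈ L, p.1 ≤ i ∧ i < p.2) ∧
  L.Pairwise (fun p q => p.2 ≤ q.1)

lemma pvInv_fold (cs : List Char) :
    ∀ (l pre : List Char) (acc : List (Int × Int)) (o : Option Int), cs = pre ++ l →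
      pvInv cs (pre.length : Int) acc o →
      pvInv cs ((pre.length : Int) + l.length)
        ((PySem.List.enumerate l (pre.length : Int)).foldl pvBStep (acc, o)).1
        ((PySem.List.enumerate l (pre.length : Int)).foldl pvBStep (acc, o)).2 := by
  intro l
  induction l with
  | nil =>
      intro pre acc o hcs h
      simpa [PySem.List.enumerate_nil] using h
  | cons c l ih =>
      intro pre acc o hcs h
      rw [PySem.List.enumerate_cons]
      simp only [List.foldl_cons]
      have hc : PySem.List.pyGet? cs (pre.length : Int) = some c := by
        rw [hcs]
        exact PySem.List.pyGet?_append_length pre l c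
      have hstep := pvInv_step cs (pre.length : Int) acc o c hc (by positivity) h
      have hlen : (((pre ++ [c]).length : Nat) : Int) = (pre.length : Int) + 1 := by
        simp
      have := ih (pre ++ [c]) (pvBStep (acc, o) ((pre.length : Int), c)).1
        (pvBStep (acc, o) ((pre.length : Int), c)).2 (by rw [hcs]; simp)
        (by rw [hlen]; exact hstep)
      rw [hlen] at this
      have harith : ((pre.length : Int) + 1) + (l.length : Int) = (pre.length : Int) + ((c :: l).length : Nat) := by
        simp
        omega
      rw [harith] at this
      exact this

lemma pvSpansOK_bSpans (cs : List Char) : pvSpansOK cs (pvBSpans cs) := by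
  have hinit : pvInv cs ((List.length ([] : List Char) : Nat) : Int) [] none := by
    refine ⟨by simp, by simp, ?_, by simp, by simp⟩
    intro i hi0 hi1 _
    simp at hi1
    omega
  have h := pvInv_fold cs cs [] [] none (by simp) hinit
  simp only [List.length_nil, Nat.cast_zero, zero_add] at h
  have hE : PySem.List.enumerate cs 0 = PySem.List.enumerate cs := rfl
  rw [hE] at h
  obtain ⟨hacc, ho, hcov, hpw, hsep⟩ := h
  unfold pvBSpans
  cases hr : ((PySem.List.enumerate cs 0).foldl pvBStep ([], none)).2 with
  | none =>
      rw [hr] at hcov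
      simp only [hr]
      refine ⟨hacc, ?_, hpw⟩
      intro i hNS
      have hlt := pvNS_lt hNS
      rcases hcov i hNS.1 hlt hNS with h' | ⟨a0, ha0, _⟩
      · exact h'
      · cases ha0
  | some a0 =>
      rw [hr] at ho hcov hsep
      simp only [hr]
      obtain ⟨b0, b1, b2, b3⟩ := ho a0 rfl
      have hNSlen : ¬ pvNS cs (cs.length : Int) := fun h' => absurd (pvNS_lt h') (by omega)
      refine ⟨?_, ?_, ?_⟩
      · intro p hp
        rcases List.mem_append.mp hp with hp' | hp'
        · exact hacc p hp'
        · have hpk : p = (a0, (cs.length : Int)) := by simpa using hp'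
          subst hpk
          exact ⟨b0, b1, le_refl _, b2, b3, hNSlen⟩
      · intro i hNS
        have hlt := pvNS_lt hNS
        rcases hcov i hNS.1 hlt hNS with ⟨p, hp, hpi⟩ | ⟨a1, ha1, hai⟩
        · exact ⟨p, List.mem_append_left _ hp, hpi⟩
        · have haa : a1 = a0 := by injection ha1 with h'; omega
          exact ⟨(a0, (cs.length : Int)), List.mem_append_right _ (by simp), by simp; omega⟩
      · rw [List.pairwise_append]
        refine ⟨hpw, by simp, ?_⟩
        intro p hp q hq
        have hq' : q = (a0, (cs.length : Int)) := by simpa using hq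
        subst hq'
        exact hsep p hp a0 rfl

-- ===== loop characterisations =====
lemma pvAWordL_stop (cs : List Char) (lo : Int) (h : ¬ pvNS cs (lo - 1)) : pvAWordL cs lo = lo := by
  rw [pvAWordL]
  apply dif_neg
  rintro ⟨h1, h2⟩
  exact h ⟨by omega, h2⟩

lemma pvAWordL_in (cs : List Char) (L : List (Int × Int)) (hOK : pvSpansOK cs L)
    (p : Int × Int) (hp : p ∈ L) :
    ∀ (m : Nat) (lo : Int), (lo - p.1).toNat ≤ m → p.1 ≤ lo - 1 → lo - 1 < p.2 →
      pvAWordL cs lo = p.1 := by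
  obtain ⟨hAll, hCov, hPw⟩ := hOK
  obtain ⟨a0, a1, a2, a3, a4, a5⟩ := hAll p hp
  intro m
  induction m with
  | zero => intro lo hm h1 h2; omega
  | succ m ih =>
      intro lo hm h1 h2
      have hNS : pvNS cs (lo - 1) := a3 _ h1 h2
      rw [pvAWordL, dif_pos ⟨by omega, hNS.2⟩]
      by_cases hlo : p.1 = lo - 1
      · rw [← hlo]
        exact pvAWordL_stop cs p.1 a4
      · exact ih (lo - 1) (by omega) (by omega) (by omega)

lemma pvASkipL_stop (cs : List Char) (t : Int) (h : t = 0 ∨ pvNS cs (t - 1)) :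
    pvASkipL cs t = t := by
  rw [pvASkipL]
  apply dif_neg
  rintro ⟨h1, h2⟩
  rcases h with rfl | hNS
  · omega
  · exact ((pvNS_valid_iff hNS.1 (pvNS_lt hNS)).mp h2) hNS

lemma pvASkipL_to (cs : List Char) (t : Int) :
    ∀ (m : Nat) (lo : Int), (lo - t).toNat ≤ m → 0 ≤ t → t ≤ lo → lo ≤ (cs.length : Int) →
      (∀ j, t ≤ j → j < lo → ¬ pvNS cs j) → (t = 0 ∨ pvNS cs (t - 1)) →
      pvASkipL cs lo = t := by
  intro m
  induction m with
  | zero =>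
      intro lo hm h0 h1 h2 hsp hstop
      have : lo = t := by omega
      rw [this]
      exact pvASkipL_stop cs t hstop
  | succ m ih =>
      intro lo hm h0 h1 h2 hsp hstop
      by_cases hlt : lo = t
      · rw [hlt]
        exact pvASkipL_stop cs t hstop
      · have hj : ¬ pvNS cs (lo - 1) := hsp (lo - 1) (by omega) (by omega)
        have hg : ((PySem.List.pyGet? cs (lo - 1)).any fun c => PySem.Chars.isspace c) = true :=
          (pvNS_valid_iff (by omega) (by omega)).mpr hj
        rw [pvASkipL, dif_pos ⟨by omega, hg⟩]
        exact ih (lo - 1) (by omega) h0 (by omega) (by omega) (fun j hj1 hj2 => hsp j hj1 (by omega)) hstop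

lemma pvAWordR_stop (cs : List Char) (hi : Int) (h0 : 0 ≤ hi) (h : ¬ pvNS cs hi) : pvAWordR cs hi = hi := by
  rw [pvAWordR]
  apply dif_neg
  rintro ⟨h1, h2⟩
  exact h ⟨h0, h2⟩

lemma pvAWordR_in (cs : List Char) (L : List (Int × Int)) (hOK : pvSpansOK cs L)
    (p : Int × Int) (hp : p ∈ L) :
    ∀ (m : Nat) (hi : Int), (p.2 - hi).toNat ≤ m → p.1 ≤ hi → hi < p.2 →
      pvAWordR cs hi = p.2 := by
  obtain ⟨hAll, hCov, hPw⟩ := hOK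
  obtain ⟨a0, a1, a2, a3, a4, a5⟩ := hAll p hp
  intro m
  induction m with
  | zero => intro hi hm h1 h2; omega
  | succ m ih =>
      intro hi hm h1 h2
      have hNS : pvNS cs hi := a3 _ h1 h2
      rw [pvAWordR, dif_pos ⟨by omega, hNS.2⟩]
      by_cases hhi : hi + 1 = p.2
      · rw [hhi]
        exact pvAWordR_stop cs p.2 (by omega) a5
      · exact ih (hi + 1) (by omega) (by omega) (by omega)

lemma pvASkipR_stop (cs : List Char) (t : Int) (h0 : 0 ≤ t)
    (h : t = (cs.length : Int) ∨ pvNS cs t) : pvASkipR cs t = t := by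
  rw [pvASkipR]
  apply dif_neg
  rintro ⟨h1, h2⟩
  rcases h with heq | hNS
  · omega
  · exact ((pvNS_valid_iff h0 h1).mp h2) hNS

lemma pvASkipR_to (cs : List Char) (t : Int) :
    ∀ (m : Nat) (hi : Int), (t - hi).toNat ≤ m → 0 ≤ hi → hi ≤ t → t ≤ (cs.length : Int) →
      (∀ j, hi ≤ j → j < t → ¬ pvNS cs j) → (t = (cs.length : Int) ∨ pvNS cs t) →
      pvASkipR cs hi = t := by
  intro m
  induction m with
  | zero =>
      intro hi hm h0 h1 h2 hsp hstop
      have : hi = t := by omega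
      rw [this]
      exact pvASkipR_stop cs t (by omega) hstop
  | succ m ih =>
      intro hi hm h0 h1 h2 hsp hstop
      by_cases hlt : hi = t
      · rw [hlt]
        exact pvASkipR_stop cs t (by omega) hstop
      · have hj : ¬ pvNS cs hi := hsp hi (by omega) (by omega)
        have hg : ((PySem.List.pyGet? cs hi).any fun c => PySem.Chars.isspace c) = true :=
          (pvNS_valid_iff h0 (by omega)).mpr hj
        rw [pvASkipR, dif_pos ⟨by omega, hg⟩]
        exact ih (hi + 1) (by omega) (by omega) (by omega) h2 (fun j hj1 hj2 => hsp j (by omega) hj2) hstop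

-- a conditional-update foldl keeps the value of the LAST matching element
lemma pvFoldlPick {α : Type} (P : α → Prop) [DecidablePred P] (f : α → Int) (l : List α) (d : Int) :
    l.foldl (fun p q => if P q then f q else p) d =
      (match l.reverse.find? (fun q => decide (P q)) with | some q => f q | none => d) := by
  induction l using List.reverseRecOn with
  | nil => simp
  | append_singleton l x ih =>
      rw [List.foldl_append, List.reverse_append]
      simp only [List.foldl_cons, List.foldl_nil, List.reverse_singleton, List.singleton_append,
        List.find?_cons]
      by_cases hx : P x <;> simp [hx, ih]

-- ===== grabbing the neighbouring word: skip+word of A = ordered lookup of B =====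
lemma pvGrabL (cs : List Char) (lo1 : Int) (h0 : 0 < lo1) (h1 : lo1 ≤ (cs.length : Int))
    (h2 : ¬ pvNS cs (lo1 - 1)) :
    pvAWordL cs (pvASkipL cs lo1) =
      (pvBSpans cs).foldl (fun p q => if q.2 ≤ lo1 then q.1 else p) 0 := by
  obtain ⟨hAll, hCov, hPw⟩ := pvSpansOK_bSpans cs
  rw [pvFoldlPick (fun q => q.2 ≤ lo1) (fun q => q.1) (pvBSpans cs) 0]
  cases hf : (pvBSpans cs).reverse.find? (fun q => decide (q.2 ≤ lo1)) with
  | none =>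
      dsimp only
      have hsp : ∀ j, 0 ≤ j → j < lo1 → ¬ pvNS cs j := by
        intro j hj0 hj1 hNS
        obtain ⟨q, hq, hqi⟩ := hCov j hNS
        have hq2 : q.2 ≤ lo1 := by
          by_contra hgt
          exact h2 ((hAll q hq).2.2.2.1 (lo1 - 1) (by omega) (by omega))
        have hn := List.find?_eq_none.mp hf q (List.mem_reverse.mpr hq)
        simp at hn
        omega
      have hskip : pvASkipL cs lo1 = 0 :=
        pvASkipL_to cs 0 lo1.toNat lo1 (by omega) (by omega) (by omega) h1
          (fun j hj1 hj2 => hsp j hj1 hj2) (Or.inl rfl)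
      rw [hskip]
      exact pvAWordL_stop cs 0 (fun h => by have := h.1; omega)
  | some q =>
      dsimp only
      obtain ⟨hqpred, l1, l2, hdec, hfail⟩ := List.find?_eq_some_iff_append.mp hf
      simp only [decide_eq_true_eq] at hqpred
      have hqmem : q ∈ pvBSpans cs := List.mem_reverse.mp (List.mem_of_find?_eq_some hf)
      obtain ⟨b0, b1, b2, b3, b4, b5⟩ := hAll q hqmem
      have hdecL : pvBSpans cs = l2.reverse ++ q :: l1.reverse := by
        rw [← List.reverse_reverse (pvBSpans cs), hdec]
        simp
      have hsp : ∀ j, q.2 ≤ j → j < lo1 → ¬ pvNS cs j := by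
        intro j hj0 hj1 hNS
        obtain ⟨r, hr, hri⟩ := hCov j hNS
        have hr2 : r.2 ≤ lo1 := by
          by_contra hgt
          exact h2 ((hAll r hr).2.2.2.1 (lo1 - 1) (by omega) (by omega))
        rw [hdecL] at hr hPw
        rw [List.pairwise_append] at hPw
        rcases List.mem_append.mp hr with hrA | hrB
        · have := hPw.2.2 r hrA q (by simp)
          omega
        · rcases List.mem_cons.mp hrB with hrq | hrC
          · rw [hrq] at hri; omega
          · have := hfail r (by simpa using hrC)
            simp at this
            omega
      have hskip : pvASkipL cs lo1 = q.2 :=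
        pvASkipL_to cs q.2 lo1.toNat lo1 (by omega) (by omega) hqpred h1 hsp
          (Or.inr (b3 (q.2 - 1) (by omega) (by omega)))
      rw [hskip]
      exact pvAWordL_in cs (pvBSpans cs) (pvSpansOK_bSpans cs) q hqmem (q.2 - q.1).toNat q.2
        (by omega) (by omega) (by omega)

lemma pvGrabR (cs : List Char) (hi1 : Int) (h0 : 0 ≤ hi1) (h1 : hi1 < (cs.length : Int))
    (h2 : ¬ pvNS cs hi1) :
    pvAWordR cs (pvASkipR cs hi1) =
      (pvBSpans cs).reverse.foldl (fun q p => if hi1 ≤ p.1 then p.2 else q) (cs.length : Int) := by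
  obtain ⟨hAll, hCov, hPw⟩ := pvSpansOK_bSpans cs
  rw [pvFoldlPick (fun p => hi1 ≤ p.1) (fun p => p.2) (pvBSpans cs).reverse (cs.length : Int)]
  rw [List.reverse_reverse]
  cases hf : (pvBSpans cs).find? (fun p => decide (hi1 ≤ p.1)) with
  | none =>
      dsimp only
      have hsp : ∀ j, hi1 ≤ j → j < (cs.length : Int) → ¬ pvNS cs j := by
        intro j hj0 hj1 hNS
        obtain ⟨r, hr, hri⟩ := hCov j hNS
        have hr1 : hi1 ≤ r.1 := by
          by_contra hgt
          exact h2 ((hAll r hr).2.2.2.1 hi1 (by omega) (by omega))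
        have hn := List.find?_eq_none.mp hf r hr
        simp at hn
        omega
      have hskip : pvASkipR cs hi1 = (cs.length : Int) :=
        pvASkipR_to cs (cs.length : Int) cs.length hi1 (by omega) h0 (by omega) (by omega)
          (fun j hj1 hj2 => hsp j hj1 hj2) (Or.inl rfl)
      rw [hskip]
      exact pvAWordR_stop cs (cs.length : Int) (by omega) (fun h => absurd (pvNS_lt h) (by omega))
  | some p =>
      dsimp only
      obtain ⟨hppred, l1, l2, hdec, hfail⟩ := List.find?_eq_some_iff_append.mp hf
      simp only [decide_eq_true_eq] at hppred
      have hpmem : p ∈ pvBSpans cs := List.mem_of_find?_eq_some hf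
      obtain ⟨b0, b1, b2, b3, b4, b5⟩ := hAll p hpmem
      have hsp : ∀ j, hi1 ≤ j → j < p.1 → ¬ pvNS cs j := by
        intro j hj0 hj1 hNS
        obtain ⟨r, hr, hri⟩ := hCov j hNS
        have hr1 : hi1 ≤ r.1 := by
          by_contra hgt
          exact h2 ((hAll r hr).2.2.2.1 hi1 (by omega) (by omega))
        rw [hdec] at hr hPw
        rw [List.pairwise_append] at hPw
        rcases List.mem_append.mp hr with hrA | hrB
        · have := hfail r hrA
          simp at this
          omega
        · rcases List.mem_cons.mp hrB with hrq | hrC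
          · rw [hrq] at hri; omega
          · have := (List.pairwise_cons.mp hPw.2.1).1 r hrC
            omega
      have hskip : pvASkipR cs hi1 = p.1 :=
        pvASkipR_to cs p.1 cs.length hi1 (by omega) h0 hppred (by omega) hsp
          (Or.inr (b3 p.1 (by omega) (by omega)))
      rw [hskip]
      exact pvAWordR_in cs (pvBSpans cs) (pvSpansOK_bSpans cs) p hpmem (p.2 - p.1).toNat p.1
        (by omega) (by omega) (by omega)

lemma pvLeft_eq (cs : List Char) (lo : Int) (hlo : lo ≤ (cs.length : Int)) :
    (let lo1 := pvAWordL cs lo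
     if 0 < lo1 then pvAWordL cs (pvASkipL cs lo1) else lo1) =
    (let spans := pvBSpans cs
     let lo1 := match spans.find? (fun p => decide (p.1 ≤ lo - 1 ∧ lo - 1 < p.2)) with
                | some p => p.1
                | none => lo
     if 0 < lo1 then spans.foldl (fun p q => if q.2 ≤ lo1 then q.1 else p) 0 else lo1) := by
  obtain ⟨hAll, hCov, hPw⟩ := pvSpansOK_bSpans cs
  show (if 0 < pvAWordL cs lo then pvAWordL cs (pvASkipL cs (pvAWordL cs lo)) else pvAWordL cs lo) =
    (if 0 < (match (pvBSpans cs).find? (fun p => decide (p.1 ≤ lo - 1 ∧ lo - 1 < p.2)) with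
             | some p => p.1 | none => lo) then
       (pvBSpans cs).foldl
         (fun p q => if q.2 ≤ (match (pvBSpans cs).find? (fun p => decide (p.1 ≤ lo - 1 ∧ lo - 1 < p.2)) with
                               | some p => p.1 | none => lo) then q.1 else p) 0
     else (match (pvBSpans cs).find? (fun p => decide (p.1 ≤ lo - 1 ∧ lo - 1 < p.2)) with
           | some p => p.1 | none => lo))
  cases hf : (pvBSpans cs).find? (fun p => decide (p.1 ≤ lo - 1 ∧ lo - 1 < p.2)) with
  | none =>
      have hNS : ¬ pvNS cs (lo - 1) := by
        intro hNS
        obtain ⟨p, hp, hpi⟩ := hCov _ hNS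
        have := List.find?_eq_none.mp hf p hp
        simp at this
        omega
      have hA : pvAWordL cs lo = lo := pvAWordL_stop cs lo hNS
      dsimp only
      rw [hA]
      by_cases h0 : 0 < lo
      · rw [if_pos h0, if_pos h0]
        exact pvGrabL cs lo h0 hlo hNS
      · rw [if_neg h0, if_neg h0]
  | some p =>
      have hp := List.mem_of_find?_eq_some hf
      have hpred := List.find?_some hf
      simp only [decide_eq_true_eq] at hpred
      obtain ⟨b0, b1, b2, b3, b4, b5⟩ := hAll p hp
      have hA : pvAWordL cs lo = p.1 :=
        pvAWordL_in cs (pvBSpans cs) (pvSpansOK_bSpans cs) p hp (lo - p.1).toNat lo le_rfl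
          hpred.1 hpred.2
      dsimp only
      rw [hA]
      by_cases h0 : 0 < p.1
      · rw [if_pos h0, if_pos h0]
        exact pvGrabL cs p.1 h0 (by omega) b4
      · rw [if_neg h0, if_neg h0]

lemma pvRight_eq (cs : List Char) (hi : Int) (hhi : 0 ≤ hi) :
    (let hi1 := pvAWordR cs hi
     if hi1 < (cs.length : Int) then pvAWordR cs (pvASkipR cs hi1) else hi1) =
    (let spans := pvBSpans cs
     let hi1 := match spans.find? (fun p => decide (p.1 ≤ hi ∧ hi < p.2)) with
                | some p => p.2
                | none => hi
     if hi1 < (cs.length : Int) then spans.reverse.foldl (fun q p => if hi1 ≤ p.1 then p.2 else q) (cs.length : Int) else hi1) := by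
  obtain ⟨hAll, hCov, hPw⟩ := pvSpansOK_bSpans cs
  show (if pvAWordR cs hi < (cs.length : Int) then pvAWordR cs (pvASkipR cs (pvAWordR cs hi)) else pvAWordR cs hi) =
    (if (match (pvBSpans cs).find? (fun p => decide (p.1 ≤ hi ∧ hi < p.2)) with
         | some p => p.2 | none => hi) < (cs.length : Int) then
       (pvBSpans cs).reverse.foldl
         (fun q p => if (match (pvBSpans cs).find? (fun p => decide (p.1 ≤ hi ∧ hi < p.2)) with
                         | some p => p.2 | none => hi) ≤ p.1 then p.2 else q) (cs.length : Int)
     else (match (pvBSpans cs).find? (fun p => decide (p.1 ≤ hi ∧ hi < p.2)) with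
           | some p => p.2 | none => hi))
  cases hf : (pvBSpans cs).find? (fun p => decide (p.1 ≤ hi ∧ hi < p.2)) with
  | none =>
      have hNS : ¬ pvNS cs hi := by
        intro hNS
        obtain ⟨p, hp, hpi⟩ := hCov _ hNS
        have := List.find?_eq_none.mp hf p hp
        simp at this
        omega
      have hA : pvAWordR cs hi = hi := pvAWordR_stop cs hi hhi hNS
      dsimp only
      rw [hA]
      by_cases h1 : hi < (cs.length : Int)
      · rw [if_pos h1, if_pos h1]
        exact pvGrabR cs hi hhi h1 hNS
      · rw [if_neg h1, if_neg h1]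
  | some p =>
      have hp := List.mem_of_find?_eq_some hf
      have hpred := List.find?_some hf
      simp only [decide_eq_true_eq] at hpred
      obtain ⟨b0, b1, b2, b3, b4, b5⟩ := hAll p hp
      have hA : pvAWordR cs hi = p.2 :=
        pvAWordR_in cs (pvBSpans cs) (pvSpansOK_bSpans cs) p hp (p.2 - hi).toNat hi le_rfl
          hpred.1 hpred.2
      dsimp only
      rw [hA]
      by_cases h1 : p.2 < (cs.length : Int)
      · rw [if_pos h1, if_pos h1]
        exact pvGrabR cs p.2 (by omega) h1 b5
      · rw [if_neg h1, if_neg h1]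

-- ===== VERDICT (by name: the statement is the Claim_ definition above) =====
theorem expand_word_context_py_spec : Claim_equal_expand_word_context_py := by
  intro s lo hi _hdom hpre
  obtain ⟨hlo, hhi⟩ := hpre
  unfold Spec_expand_word_context_py expand_word_context_py expand_word_context_py_alt
  exact Prod.ext (pvLeft_eq s.toList lo hlo) (pvRight_eq s.toList hi hhi)
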